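-- pv_equiv track=rewrite | github.com/rachmanz/ChipperShipper | default.py | super_enkripsi
-- ===== SOURCE A (Python) =====
-- def super_enkripsi(plaintext, key, mode):
--     def vigenere_cipher(text, key, mode):
--         result = ""
--         key_index = 0
--         for char in text:
--             if char.isalpha():
--                 key_char = key[key_index % len(key)]
--                 key_offset = ord(key_char.upper()) - ord('A')
--                 if char.isupper():
--                     char_offset = ord(char) - ord('A')
--                     new_offset = (char_offset + key_offset) % 26 if mode == "encrypt" else (char_offset - key_offset) % 26
--                     result += chr(new_offset + ord('A'))
--                 elif char.islower():
--                     char_offset = ord(char) - ord('a')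
--                     new_offset = (char_offset + key_offset) % 26 if mode == "encrypt" else (char_offset - key_offset) % 26
--                     result += chr(new_offset + ord('a'))
--                 key_index += 1
--             else:
--                 result += char
--         return result
--
--     def transpose_cipher(text, mode):
--         result = ""
--         rows = len(text) // 5 + 1
--         cols = 5
--         if mode == "encrypt":
--             for col in range(cols):
--                 for row in range(rows):
--                     index = row * cols + col
--                     if index < len(text):
--                         result += text[index]
--         elif mode == "decrypt":
--             for row in range(rows):
--                 for col in range(cols):
--                     index = row + col * rows
--                     if index < len(text):
--                         result += text[index]
--         return result
--
--     if mode == "encrypt":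
--         step1 = vigenere_cipher(plaintext, key, "encrypt")
--         ciphertext = transpose_cipher(step1, "encrypt")
--     elif mode == "decrypt":
--         step1 = transpose_cipher(plaintext, "decrypt")
--         ciphertext = vigenere_cipher(step1, key, "decrypt")
--     else:
--         raise ValueError("Mode harus 'encrypt' atau 'decrypt'")
--     return ciphertext
-- ===== SOURCE B (Python) =====
-- def super_enkripsi(plaintext, key, mode):
--     def vigenere(text, key, sign):
--         offs = [ord(c.upper()) - ord('A') for c in key]
--         out = []
--         ki = 0
--         for ch in text:
--             if ch.isupper():
--                 out.append(chr((ord(ch) - 65 + sign * offs[ki % len(offs)]) % 26 + 65))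
--                 ki += 1
--             elif ch.islower():
--                 out.append(chr((ord(ch) - 97 + sign * offs[ki % len(offs)]) % 26 + 97))
--                 ki += 1
--             else:
--                 out.append(ch)
--         return "".join(out)
--
--     def chunks(text, size):
--         parts = []
--         while text:
--             parts.append(text[:size])
--             text = text[size:]
--         return parts
--
--     def transpose(text, mode):
--         if mode == "encrypt":
--             width = 5
--         else:
--             width = len(text) // 5 + 1
--         grid = chunks(text, width)
--         out = []
--         for i in range(width):
--             for part in grid:
--                 if i < len(part):
--                     out.append(part[i])
--         return "".join(out)
--
--     if mode == "encrypt":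
--         return transpose(vigenere(plaintext, key, 1), "encrypt")
--     elif mode == "decrypt":
--         return vigenere(transpose(plaintext, "decrypt"), key, -1)
--     else:
--         raise ValueError("Mode harus 'encrypt' atau 'decrypt'")
-- ===== Notes on version B (the rewrite author's own statement) =====
-- stated objective: alternative
-- what changed: The transposition is reimplemented by materializing the grid as an explicit list of row/column chunks (a while-loop splitter plus a fill-then-read table traversal) instead of A's on-the-fly index arithmetic, and the Vigenere pass precomputes the key-offset table once and uses a signed shift instead of duplicated encrypt/decrypt branches.
import Mathlib
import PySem

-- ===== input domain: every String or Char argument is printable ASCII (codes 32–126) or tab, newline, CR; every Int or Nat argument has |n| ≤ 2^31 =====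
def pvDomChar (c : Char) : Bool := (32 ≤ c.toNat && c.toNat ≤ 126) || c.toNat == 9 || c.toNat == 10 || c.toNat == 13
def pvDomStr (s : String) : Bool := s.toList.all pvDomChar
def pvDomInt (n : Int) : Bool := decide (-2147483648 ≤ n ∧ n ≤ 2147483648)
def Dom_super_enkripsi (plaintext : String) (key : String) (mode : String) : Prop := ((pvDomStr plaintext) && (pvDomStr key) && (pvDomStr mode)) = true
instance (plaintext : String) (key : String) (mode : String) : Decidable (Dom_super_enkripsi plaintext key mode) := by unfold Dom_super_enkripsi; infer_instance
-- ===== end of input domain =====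

-- B materializes the transposition grid as an explicit chunk list read column-wise instead of A's
-- on-the-fly index arithmetic, and precomputes the Vigenère key offsets with a signed shift (objective: alternative).


-- ===== PORT A =====
-- A's vigenere_cipher loop; state = (result, key_index)
def vigA_go (keyL : List Char) (mode : String) : List Char → List Char → Int → List Char
  | [], res, _ => res
  | ch :: rest, res, ki =>
    if PySem.Chars.isalpha ch then
      let keyChar := PySem.List.pyGetD keyL (PySem.Int.mod ki (keyL.length : Int)) 'A'
      let keyOff : Int := ((PySem.Chars.upperChar keyChar).toNat : Int) - 65
      if PySem.Chars.isupper ch then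
        let co : Int := (ch.toNat : Int) - 65
        let no : Int := if mode = "encrypt" then PySem.Int.mod (co + keyOff) 26 else PySem.Int.mod (co - keyOff) 26
        vigA_go keyL mode rest (res ++ [Char.ofNat (no.toNat + 65)]) (ki + 1)
      else if PySem.Chars.islower ch then
        let co : Int := (ch.toNat : Int) - 97
        let no : Int := if mode = "encrypt" then PySem.Int.mod (co + keyOff) 26 else PySem.Int.mod (co - keyOff) 26
        vigA_go keyL mode rest (res ++ [Char.ofNat (no.toNat + 97)]) (ki + 1)
      else
        vigA_go keyL mode rest res (ki + 1)
    else
      vigA_go keyL mode rest (res ++ [ch]) ki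

-- A's transpose_cipher: nested index loops (text[index] is guarded by 0 ≤ index < len, so pyGetD is exact)
def transA (text : List Char) (mode : String) : List Char :=
  let n : Int := (text.length : Int)
  let rows : Int := PySem.Int.floordiv n 5 + 1
  let cols : Int := 5
  if mode = "encrypt" then
    (PySem.List.pyRange 0 cols 1).foldl (fun res col =>
      (PySem.List.pyRange 0 rows 1).foldl (fun res row =>
        if row * cols + col < n then res ++ [PySem.List.pyGetD text (row * cols + col) ' '] else res) res) []
  else if mode = "decrypt" then
    (PySem.List.pyRange 0 rows 1).foldl (fun res row =>
      (PySem.List.pyRange 0 cols 1).foldl (fun res col =>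
        if row + col * rows < n then res ++ [PySem.List.pyGetD text (row + col * rows) ' '] else res) res) []
  else []

def super_enkripsi (plaintext : String) (key : String) (mode : String) : String :=
  if mode = "encrypt" then
    String.ofList (transA (vigA_go key.toList "encrypt" plaintext.toList [] 0) "encrypt")
  else if mode = "decrypt" then
    String.ofList (vigA_go key.toList "decrypt" (transA plaintext.toList "decrypt") [] 0)
  else "" -- Python raises ValueError here; excluded by Pre_super_enkripsi

-- ===== PORT B =====
-- B's vigenere loop with precomputed key offsets and a signed shift
def vigB_go (offs : List Int) (sign : Int) : List Char → List Char → Nat → List Char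
  | [], out, _ => out
  | ch :: rest, out, ki =>
    if PySem.Chars.isupper ch then
      vigB_go offs sign rest (out ++ [Char.ofNat ((PySem.Int.mod ((ch.toNat : Int) - 65 + sign * offs.getD (ki % offs.length) 0) 26).toNat + 65)]) (ki + 1)
    else if PySem.Chars.islower ch then
      vigB_go offs sign rest (out ++ [Char.ofNat ((PySem.Int.mod ((ch.toNat : Int) - 97 + sign * offs.getD (ki % offs.length) 0) 26).toNat + 97)]) (ki + 1)
    else
      vigB_go offs sign rest (out ++ [ch]) ki

def vigB (text : List Char) (keyL : List Char) (sign : Int) : List Char :=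
  vigB_go (keyL.map (fun c => ((PySem.Chars.upperChar c).toNat : Int) - 65)) sign text [] 0

-- B's while loop splitting text into consecutive chunks of the given size
-- (the 'size = 0' disjunct is only a totality guard: B calls chunksB with size ≥ 1 only)
def chunksB (text : List Char) (size : Nat) : List (List Char) :=
  if h : text = [] ∨ size = 0 then [] else text.take size :: chunksB (text.drop size) size
termination_by text.length
decreasing_by
  have h1 : text ≠ [] := fun hh => h (Or.inl hh)
  have h2 : size ≠ 0 := fun hh => h (Or.inr hh)
  have h3 : 0 < text.length := List.length_pos_iff.mpr h1
  simp only [List.length_drop]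
  omega

-- B's transpose: materialize the grid, then read it column-wise
def transB (text : List Char) (mode : String) : List Char :=
  let width : Nat := if mode = "encrypt" then 5 else text.length / 5 + 1
  let grid := chunksB text width
  (List.range width).foldl (fun out i =>
    grid.foldl (fun out part => if i < part.length then out ++ [part.getD i ' '] else out) out) []

def super_enkripsi_alt (plaintext : String) (key : String) (mode : String) : String :=
  if mode = "encrypt" then
    String.ofList (transB (vigB plaintext.toList key.toList 1) "encrypt")
  else if mode = "decrypt" then
    String.ofList (vigB (transB plaintext.toList "decrypt") key.toList (-1))
  else "" -- Python raises ValueError here; excluded by Pre_super_enkripsi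

-- ===== PRECONDITION & SPEC =====
-- Pre_ excludes exactly the inputs where Python A raises: a mode other than "encrypt"/"decrypt" (ValueError),
-- and an empty key together with an alphabetic character in the text (ZeroDivisionError in key_index % len(key)).
def Pre_super_enkripsi (plaintext : String) (key : String) (mode : String) : Prop :=
  (mode = "encrypt" ∨ mode = "decrypt") ∧
  (key.toList ≠ [] ∨ plaintext.toList.all (fun c => !PySem.Chars.isalpha c) = true)
instance (plaintext : String) (key : String) (mode : String) : Decidable (Pre_super_enkripsi plaintext key mode) := by unfold Pre_super_enkripsi; infer_instance

def pvWitness_super_enkripsi : String × String × String := ("Hello, World!", "KeY", "encrypt")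

def Spec_super_enkripsi (plaintext : String) (key : String) (mode : String) (out : String) : Prop := out = super_enkripsi_alt plaintext key mode
instance (plaintext : String) (key : String) (mode : String) (out : String) : Decidable (Spec_super_enkripsi plaintext key mode out) := by unfold Spec_super_enkripsi; infer_instance

-- ===== CLAIM (what is proved, stated in full; the proofs are below) =====
def Claim_equal_super_enkripsi : Prop := ∀ (plaintext : String) (key : String) (mode : String), Dom_super_enkripsi plaintext key mode → Pre_super_enkripsi plaintext key mode → Spec_super_enkripsi plaintext key mode (super_enkripsi plaintext key mode)

-- ===== LEMMAS AND PROOFS =====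

-- chars of text at positions r, r+(k+1), r+2(k+1), … — the common value of both transposition inner loops
def pickStep (k : Nat) (l : List Char) (r : Nat) : List Char :=
  match h : l[r]? with
  | none => []
  | some x => x :: pickStep k (l.drop (k + 1)) r
termination_by l.length
decreasing_by
  have : r < l.length := (List.getElem?_eq_some_iff.mp h).1
  simp only [List.length_drop]
  omega

theorem pickStep_eq_nil (k : Nat) (l : List Char) (r : Nat) (h : l.length ≤ r) : pickStep k l r = [] := by
  rw [pickStep]
  split
  · rfl
  · next x hx => rw [List.getElem?_eq_none h] at hx; cases hx

theorem pickStep_eq_cons (k : Nat) (l : List Char) (r : Nat) (h : r < l.length) :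
    pickStep k l r = l[r] :: pickStep k (l.drop (k + 1)) r := by
  rw [pickStep]
  split
  · next hx => rw [List.getElem?_eq_getElem h] at hx; cases hx
  · next x hx =>
      rw [List.getElem?_eq_getElem h] at hx
      injection hx with hx
      rw [hx]

theorem mem_pickStep (k : Nat) (l : List Char) (r : Nat) (c : Char) (h : c ∈ pickStep k l r) : c ∈ l := by
  induction l using pickStep.induct (k := k) (r := r) with
  | case1 l h1 =>
      rw [pickStep_eq_nil k l r (by simpa using List.getElem?_eq_none_iff.mp h1)] at h
      cases h
  | case2 l x h1 ih =>
      rw [pickStep_eq_cons k l r (List.getElem?_eq_some_iff.mp h1).1] at h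
      rcases List.mem_cons.mp h with h2 | h2
      · subst h2; exact List.getElem_mem _
      · exact List.mem_of_mem_drop (ih h2)

-- B's grid-reading inner loop equals pickStep
theorem chunk_fold_eq (k : Nat) (hk : 0 < k) (i : Nat) (hi : i < k) :
    ∀ (l : List Char) (out : List Char),
    (chunksB l k).foldl (fun out part => if i < part.length then out ++ [part.getD i ' '] else out) out
      = out ++ pickStep (k - 1) l i := by
  intro l
  induction l using chunksB.induct (size := k) with
  | case1 l h =>
      have hl : l = [] := h.resolve_right (by omega)
      subst hl
      intro out
      rw [chunksB]
      simp [pickStep_eq_nil (k - 1) [] i (by simp)]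
  | case2 l h ih =>
      intro out
      rw [chunksB]
      simp only [h, dite_false]
      rw [List.foldl_cons, ih]
      have hlen : (l.take k).length = min k l.length := by simp
      by_cases hin : i < l.length
      · have hc : i < (l.take k).length := by omega
        rw [if_pos (by omega)]
        rw [pickStep_eq_cons (k - 1) l i hin]
        have hk1 : k - 1 + 1 = k := by omega
        rw [hk1]
        have : (l.take k).getD i ' ' = l[i] := by
          rw [List.getD_eq_getElem _ _ hc]
          simp [List.getElem_take]
        rw [this, List.append_assoc]
        rfl
      · rw [if_neg (by omega)]
        rw [pickStep_eq_nil (k - 1) l i (by omega),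
            pickStep_eq_nil (k - 1) (l.drop k) i (by simp only [List.length_drop]; omega)]

-- A's index-arithmetic inner loop equals pickStep
theorem range_fold_eq (k : Nat) (hk : 0 < k) :
    ∀ (m : Nat) (l : List Char) (r : Nat) (out : List Char), l.length ≤ m * k →
    (List.range m).foldl (fun res col => if r + col * k < l.length then res ++ [l.getD (r + col * k) ' '] else res) out
      = out ++ pickStep (k - 1) l r := by
  intro m
  induction m with
  | zero =>
      intro l r out hb
      simp only [Nat.zero_mul, Nat.le_zero] at hb
      rw [pickStep_eq_nil _ _ _ (by omega)]
      simp
  | succ m ih =>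
      intro l r out hb
      rw [List.range_succ_eq_map, List.foldl_cons, List.foldl_map]
      have hbody : (fun (res : List Char) (col : Nat) =>
            if r + (Nat.succ col) * k < l.length then res ++ [l.getD (r + Nat.succ col * k) ' '] else res)
          = (fun (res : List Char) (col : Nat) =>
            if r + col * k < (l.drop k).length then res ++ [(l.drop k).getD (r + col * k) ' '] else res) := by
        funext res col
        have h1 : Nat.succ col * k = col * k + k := Nat.succ_mul col k
        have h2 : (l.drop k).length = l.length - k := by simp
        have h3 : (l.drop k).getD (r + col * k) ' ' = l.getD (k + (r + col * k)) ' ' := by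
          simp [List.getD, List.getElem?_drop]
        have h4 : k + (r + col * k) = r + (col * k + k) := by ring
        rw [h1, h2, h3, h4]
        by_cases hc : r + (col * k + k) < l.length
        · rw [if_pos hc, if_pos (by omega)]
        · rw [if_neg hc, if_neg (by omega)]
      rw [hbody, ih (l.drop k) r _ (by
        have h5 : Nat.succ m * k = m * k + k := Nat.succ_mul m k
        rw [h5] at hb
        simp only [List.length_drop]
        omega)]
      simp only [Nat.zero_mul, Nat.add_zero]
      by_cases hr : r < l.length
      · rw [if_pos hr, pickStep_eq_cons (k - 1) l r hr]
        have hk1 : k - 1 + 1 = k := by omega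
        rw [hk1, List.getD_eq_getElem l ' ' hr, List.append_assoc]
        rfl
      · rw [if_neg hr, pickStep_eq_nil (k - 1) l r (by omega),
            pickStep_eq_nil (k - 1) (l.drop k) r (by simp only [List.length_drop]; omega)]

theorem floordiv5 (n : Nat) : PySem.Int.floordiv (n : Int) 5 = ((n / 5 : Nat) : Int) := by
  exact_mod_cast PySem.Int.floordiv_natCast n 5

theorem innerA_enc (text : List Char) (c : Nat) (res : List Char) :
    (PySem.List.pyRange 0 (((text.length / 5 + 1 : Nat) : Int)) 1).foldl
      (fun res row => if row * 5 + (c : Int) < (text.length : Int) then res ++ [PySem.List.pyGetD text (row * 5 + (c : Int)) ' '] else res) res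
    = res ++ pickStep 4 text c := by
  rw [PySem.List.pyRange_one, List.foldl_map]
  have htn : (((text.length / 5 + 1 : Nat) : Int) - 0).toNat = text.length / 5 + 1 := by
    omega
  rw [htn]
  have hbody : (fun (res : List Char) (row : Nat) =>
        if ((0 : Int) + ↑row) * 5 + (c : Int) < (text.length : Int) then res ++ [PySem.List.pyGetD text (((0 : Int) + ↑row) * 5 + (c : Int)) ' '] else res)
      = (fun (res : List Char) (row : Nat) =>
        if c + row * 5 < text.length then res ++ [text.getD (c + row * 5) ' '] else res) := by
    funext res row
    have e : ((0 : Int) + ↑row) * 5 + (c : Int) = ((c + row * 5 : Nat) : Int) := by push_cast; ring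
    rw [e, PySem.List.pyGetD_natCast]
    simp only [Nat.cast_lt]
  rw [hbody]
  have := range_fold_eq 5 (by norm_num) (text.length / 5 + 1) text c res (by omega)
  simpa using this

theorem innerA_dec (text : List Char) (r : Nat) (res : List Char) :
    (PySem.List.pyRange 0 5 1).foldl
      (fun res col => if (r : Int) + col * ((text.length / 5 + 1 : Nat) : Int) < (text.length : Int) then res ++ [PySem.List.pyGetD text ((r : Int) + col * ((text.length / 5 + 1 : Nat) : Int)) ' '] else res) res
    = res ++ pickStep (text.length / 5) text r := by
  rw [PySem.List.pyRange_one, List.foldl_map]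
  have htn : ((5 : Int) - 0).toNat = 5 := by decide
  rw [htn]
  have hbody : (fun (res : List Char) (col : Nat) =>
        if (r : Int) + ((0 : Int) + ↑col) * ((text.length / 5 + 1 : Nat) : Int) < (text.length : Int) then res ++ [PySem.List.pyGetD text ((r : Int) + ((0 : Int) + ↑col) * ((text.length / 5 + 1 : Nat) : Int)) ' '] else res)
      = (fun (res : List Char) (col : Nat) =>
        if r + col * (text.length / 5 + 1) < text.length then res ++ [text.getD (r + col * (text.length / 5 + 1)) ' '] else res) := by
    funext res col
    have e : (r : Int) + ((0 : Int) + ↑col) * ((text.length / 5 + 1 : Nat) : Int) = ((r + col * (text.length / 5 + 1) : Nat) : Int) := by push_cast; ring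
    rw [e, PySem.List.pyGetD_natCast]
    simp only [Nat.cast_lt]
  rw [hbody]
  have := range_fold_eq (text.length / 5 + 1) (by omega) 5 text r res (by omega)
  simpa using this

theorem trans_enc (text : List Char) : transA text "encrypt" = transB text "encrypt" := by
  have hA : transA text "encrypt" = (List.range 5).foldl (fun out c => out ++ pickStep 4 text c) [] := by
    rw [transA]
    simp only [String.reduceEq, reduceIte, floordiv5]
    rw [show ((text.length / 5 : Nat) : Int) + 1 = ((text.length / 5 + 1 : Nat) : Int) by push_cast; ring]
    rw [PySem.List.pyRange_one 0 5, List.foldl_map]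
    rw [show ((5 : Int) - 0).toNat = 5 by decide]
    simp only [zero_add]
    refine PySem.List.foldl_congr_mem _ _ _ _ ?_
    intro acc col hcol
    exact innerA_enc text col acc
  have hB : transB text "encrypt" = (List.range 5).foldl (fun out c => out ++ pickStep 4 text c) [] := by
    rw [transB]
    simp only [String.reduceEq, reduceIte]
    refine PySem.List.foldl_congr_mem _ _ _ _ ?_
    intro acc i hi
    have := chunk_fold_eq 5 (by norm_num) i (List.mem_range.mp hi) text acc
    simpa using this
  rw [hA, hB]

theorem transB_dec_eq (text : List Char) : transB text "decrypt"
    = (List.range (text.length / 5 + 1)).foldl (fun out r => out ++ pickStep (text.length / 5) text r) [] := by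
  rw [transB]
  simp only [String.reduceEq, reduceIte]
  refine PySem.List.foldl_congr_mem _ _ _ _ ?_
  intro acc i hi
  have := chunk_fold_eq (text.length / 5 + 1) (by omega) i (List.mem_range.mp hi) text acc
  simpa using this

theorem trans_dec (text : List Char) : transA text "decrypt" = transB text "decrypt" := by
  have hA : transA text "decrypt" = (List.range (text.length / 5 + 1)).foldl (fun out r => out ++ pickStep (text.length / 5) text r) [] := by
    rw [transA]
    simp only [String.reduceEq, reduceIte, floordiv5]
    rw [show ((text.length / 5 : Nat) : Int) + 1 = ((text.length / 5 + 1 : Nat) : Int) by push_cast; ring]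
    rw [PySem.List.pyRange_one 0 ((text.length / 5 + 1 : Nat) : Int), List.foldl_map]
    rw [show ((((text.length / 5 + 1 : Nat) : Int)) - 0).toNat = text.length / 5 + 1 by omega]
    simp only [zero_add]
    refine PySem.List.foldl_congr_mem _ _ _ _ ?_
    intro acc row hrow
    exact innerA_dec text row acc
  rw [hA, transB_dec_eq]

theorem vig_eq (keyL : List Char) (mode : String) (sign : Int)
    (hs : sign = if mode = "encrypt" then 1 else -1) :
    ∀ (text res : List Char) (ki : Nat),
      (keyL ≠ [] ∨ ∀ c ∈ text, PySem.Chars.isalpha c = false) →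
      vigA_go keyL mode text res (ki : Int)
        = vigB_go (keyL.map (fun c => ((PySem.Chars.upperChar c).toNat : Int) - 65)) sign text res ki := by
  intro text
  induction text with
  | nil => intro res ki _; rfl
  | cons ch rest ih =>
      intro res ki h
      have hrest : keyL ≠ [] ∨ ∀ c ∈ rest, PySem.Chars.isalpha c = false := by
        rcases h with h | h
        · exact Or.inl h
        · exact Or.inr (fun c hc => h c (List.mem_cons_of_mem _ hc))
      have hki1 : (ki : Int) + 1 = ((ki + 1 : Nat) : Int) := by push_cast; ring
      rw [vigA_go, vigB_go]
      by_cases ha : PySem.Chars.isalpha ch = true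
      · have hkey : keyL ≠ [] := by
          rcases h with h | h
          · exact h
          · exact absurd ha (by simp [h ch List.mem_cons_self])
        have hklen : 0 < keyL.length := List.length_pos_iff.mpr hkey
        have hjlt : ki % keyL.length < keyL.length := Nat.mod_lt _ hklen
        have hoff : (keyL.map (fun c => ((PySem.Chars.upperChar c).toNat : Int) - 65)).getD
              (ki % (keyL.map (fun c => ((PySem.Chars.upperChar c).toNat : Int) - 65)).length) 0
            = ((PySem.Chars.upperChar (PySem.List.pyGetD keyL (PySem.Int.mod (ki : Int) (keyL.length : Int)) 'A')).toNat : Int) - 65 := by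
          rw [PySem.Int.mod_natCast ki keyL.length, PySem.List.pyGetD_natCast]
          rw [List.length_map, List.getD_eq_getElem _ _ (by simpa using hjlt),
              List.getD_eq_getElem _ _ hjlt, List.getElem_map]
        by_cases hu : PySem.Chars.isupper ch = true
        · simp only [ha, hu, if_true]
          have harg : (if mode = "encrypt" then PySem.Int.mod (((ch.toNat : Int) - 65) + (((PySem.Chars.upperChar (PySem.List.pyGetD keyL (PySem.Int.mod (ki : Int) (keyL.length : Int)) 'A')).toNat : Int) - 65)) 26
                else PySem.Int.mod (((ch.toNat : Int) - 65) - (((PySem.Chars.upperChar (PySem.List.pyGetD keyL (PySem.Int.mod (ki : Int) (keyL.length : Int)) 'A')).toNat : Int) - 65)) 26)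
              = PySem.Int.mod ((ch.toNat : Int) - 65 + sign * (keyL.map (fun c => ((PySem.Chars.upperChar c).toNat : Int) - 65)).getD (ki % (keyL.map (fun c => ((PySem.Chars.upperChar c).toNat : Int) - 65)).length) 0) 26 := by
            rw [hoff]
            by_cases hm : mode = "encrypt"
            · rw [if_pos hm, hs, if_pos hm]; ring_nf
            · rw [if_neg hm, hs, if_neg hm]; ring_nf
          rw [harg, hki1]
          exact ih _ _ hrest
        · by_cases hl : PySem.Chars.islower ch = true
          · simp only [ha, hu, hl, if_true, if_false, Bool.false_eq_true]
            have harg : (if mode = "encrypt" then PySem.Int.mod (((ch.toNat : Int) - 97) + (((PySem.Chars.upperChar (PySem.List.pyGetD keyL (PySem.Int.mod (ki : Int) (keyL.length : Int)) 'A')).toNat : Int) - 65)) 26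
                  else PySem.Int.mod (((ch.toNat : Int) - 97) - (((PySem.Chars.upperChar (PySem.List.pyGetD keyL (PySem.Int.mod (ki : Int) (keyL.length : Int)) 'A')).toNat : Int) - 65)) 26)
                = PySem.Int.mod ((ch.toNat : Int) - 97 + sign * (keyL.map (fun c => ((PySem.Chars.upperChar c).toNat : Int) - 65)).getD (ki % (keyL.map (fun c => ((PySem.Chars.upperChar c).toNat : Int) - 65)).length) 0) 26 := by
              rw [hoff]
              by_cases hm : mode = "encrypt"
              · rw [if_pos hm, hs, if_pos hm]; ring_nf
              · rw [if_neg hm, hs, if_neg hm]; ring_nf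
            rw [harg, hki1]
            exact ih _ _ hrest
          · exact absurd ha (by simp [PySem.Chars.isalpha, hu, hl])
      · have hu : PySem.Chars.isupper ch = false := by
          cases hcu : PySem.Chars.isupper ch with
          | false => rfl
          | true => exact absurd (by simp [PySem.Chars.isalpha, hcu]) ha
        have hl : PySem.Chars.islower ch = false := by
          cases hcl : PySem.Chars.islower ch with
          | false => rfl
          | true => exact absurd (by simp [PySem.Chars.isalpha, hcl]) ha
        simp only [ha, hu, hl, if_false, Bool.false_eq_true]
        exact ih _ _ hrest

theorem mem_pick_fold (text : List Char) (k : Nat) (rs : List Nat) :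
    ∀ (out : List Char) (c : Char), c ∈ rs.foldl (fun out r => out ++ pickStep k text r) out → c ∈ out ∨ c ∈ text := by
  induction rs with
  | nil => intro out c h; exact Or.inl h
  | cons r rs ih =>
      intro out c h
      rcases ih _ c h with h2 | h2
      · rcases List.mem_append.mp h2 with h3 | h3
        · exact Or.inl h3
        · exact Or.inr (mem_pickStep k text r c h3)
      · exact Or.inr h2

theorem mem_transB_dec (text : List Char) (c : Char) (h : c ∈ transB text "decrypt") : c ∈ text := by
  rw [transB_dec_eq] at h
  rcases mem_pick_fold text (text.length / 5) _ [] c h with h2 | h2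
  · cases h2
  · exact h2

-- ===== VERDICT (by name: the statement is the Claim_ definition above) =====
theorem super_enkripsi_spec : Claim_equal_super_enkripsi := by
  intro pt key mode _ hpre
  unfold Spec_super_enkripsi
  rcases hpre with ⟨hm, hkey⟩
  have hkey' : key.toList ≠ [] ∨ ∀ c ∈ pt.toList, PySem.Chars.isalpha c = false := by
    rcases hkey with h | h
    · exact Or.inl h
    · refine Or.inr (fun c hc => ?_)
      have := List.all_eq_true.mp h c hc
      simpa using this
  rcases hm with hm | hm
  · subst hm
    rw [super_enkripsi, super_enkripsi_alt]
    simp only [String.reduceEq, reduceIte]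
    have hv : vigA_go key.toList "encrypt" pt.toList [] (0 : Int) = vigB pt.toList key.toList 1 := by
      rw [vigB]
      have := vig_eq key.toList "encrypt" 1 (by simp) pt.toList [] 0 hkey'
      simpa using this
    rw [hv, trans_enc]
  · subst hm
    rw [super_enkripsi, super_enkripsi_alt]
    simp only [String.reduceEq, reduceIte]
    rw [trans_dec]
    have hkey'' : key.toList ≠ [] ∨ ∀ c ∈ transB pt.toList "decrypt", PySem.Chars.isalpha c = false := by
      rcases hkey' with h | h
      · exact Or.inl h
      · exact Or.inr (fun c hc => h c (mem_transB_dec _ _ hc))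
    have hv := vig_eq key.toList "decrypt" (-1) (by simp) (transB pt.toList "decrypt") [] 0 hkey''
    rw [vigB]
    exact congrArg String.ofList (by simpa using hv)
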